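-- pv_equiv track=rewrite | github.com/mikage-961pro/MisakiAobaBot | module/tk.py | htmlPharseTester
-- ===== SOURCE A (Python) =====
-- def htmlPharseTester(str):
--     """This function is to fix Can't parse entities problem like (*>△<)"""
--     right_mouth=False
--     for i in str:
--         if i=="<":
--             right_mouth=True
--         if i==">":
--             right_mouth=False
--     return not right_mouth
-- ===== SOURCE B (Python) =====
-- def htmlPharseTester(str):
--     """This function is to fix Can't parse entities problem like (*>△<)"""
--     return str.rfind("<") <= str.rfind(">")
-- ===== Notes on version B (the rewrite author's own statement) =====
-- stated objective: idiomatic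
-- what changed: Replaces the forward state-tracking loop over every character by two str.rfind calls scanning from the end and a single comparison of the last indices of the opening and closing bracket characters (the -1 sentinels cover the absent/empty cases).
import Mathlib
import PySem

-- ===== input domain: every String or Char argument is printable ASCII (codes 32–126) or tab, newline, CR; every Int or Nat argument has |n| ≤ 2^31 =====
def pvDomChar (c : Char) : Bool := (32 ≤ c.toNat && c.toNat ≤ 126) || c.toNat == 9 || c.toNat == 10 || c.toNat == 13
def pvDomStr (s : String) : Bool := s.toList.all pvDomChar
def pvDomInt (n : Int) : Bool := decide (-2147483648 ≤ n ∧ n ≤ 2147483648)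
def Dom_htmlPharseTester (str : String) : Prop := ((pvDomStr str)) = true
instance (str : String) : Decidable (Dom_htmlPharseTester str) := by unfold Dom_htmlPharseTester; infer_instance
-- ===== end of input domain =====

-- B replaces A's forward state-tracking loop by comparing the last indices of '<' and '>' (str.rfind); idiomatic, same O(n) cost.

-- ===== PORT A =====
def htmlPharseTester (str : String) : Bool :=
  !(str.toList.foldl (fun right_mouth i =>
      let right_mouth := if i = '<' then true else right_mouth
      let right_mouth := if i = '>' then false else right_mouth
      right_mouth) false)

-- ===== PORT B =====
def htmlPharseTester_alt (str : String) : Bool :=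
  decide (PySem.Str.rfind str "<" ≤ PySem.Str.rfind str ">")

-- ===== PRECONDITION & SPEC =====
def Spec_htmlPharseTester (str : String) (out : Bool) : Prop := out = htmlPharseTester_alt str
instance (str : String) (out : Bool) : Decidable (Spec_htmlPharseTester str out) := by unfold Spec_htmlPharseTester; infer_instance

-- ===== CLAIM (what is proved, stated in full; the proofs are below) =====
def Claim_equal_htmlPharseTester : Prop := ∀ (str : String), Dom_htmlPharseTester str → Spec_htmlPharseTester str (htmlPharseTester str)

-- ===== LEMMAS AND PROOFS =====

theorem pv_go_le (s sub : List Char) : ∀ k : Nat, PySem.Chars.rfind.go s sub k ≤ (k : Int) := by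
  intro k
  induction k with
  | zero => simp [PySem.Chars.rfind.go]; split <;> omega
  | succ j ih =>
      simp only [PySem.Chars.rfind.go]
      split
      · omega
      · exact le_trans ih (by push_cast; omega)

theorem pv_rfind_lt_length (s : List Char) (d : Char) :
    PySem.Chars.rfind s [d] < (s.length : Int) := by
  unfold PySem.Chars.rfind
  cases hn : s.length with
  | zero =>
      have hs : s = [] := List.length_eq_zero_iff.mp hn
      subst hs
      simp [PySem.Chars.rfind.go, List.isPrefixOf]
  | succ n =>
      simp only [PySem.Chars.rfind.go]
      have hdrop : s.drop (n + 1) = [] := by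
        apply List.drop_eq_nil_of_le; omega
      rw [hdrop]
      simp only [List.isPrefixOf, Bool.false_eq_true, if_false]
      have := pv_go_le s [d] n
      push_cast
      omega

theorem pv_pref_eq (l : List Char) (c d : Char) (j : Nat) (hj : j < l.length) :
    [d].isPrefixOf ((l ++ [c]).drop j) = [d].isPrefixOf (l.drop j) := by
  rw [List.drop_append_of_le_length (by omega)]
  have h : l.drop j = l[j] :: l.drop (j + 1) := (List.getElem_cons_drop hj).symm
  rw [h, List.cons_append]
  simp [List.isPrefixOf]

theorem pv_go_append_lt (l : List Char) (c d : Char) :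
    ∀ k : Nat, k < l.length →
      PySem.Chars.rfind.go (l ++ [c]) [d] k = PySem.Chars.rfind.go l [d] k := by
  intro k
  induction k with
  | zero =>
      intro hk
      simp only [PySem.Chars.rfind.go]
      have := pv_pref_eq l c d 0 hk
      simp only [List.drop_zero] at this
      rw [this]
  | succ j ih =>
      intro hk
      simp only [PySem.Chars.rfind.go]
      rw [pv_pref_eq l c d (j + 1) hk, ih (by omega)]

theorem pv_rfind_append (l : List Char) (c d : Char) :
    PySem.Chars.rfind (l ++ [c]) [d] =
      if c = d then (l.length : Int) else PySem.Chars.rfind l [d] := by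
  unfold PySem.Chars.rfind
  have hlen : (l ++ [c]).length = l.length + 1 := by simp
  rw [hlen]
  simp only [PySem.Chars.rfind.go]
  have hdropall : (l ++ [c]).drop (l.length + 1) = [] := by
    apply List.drop_eq_nil_of_le; simp
  rw [hdropall]
  have h0 : ([d].isPrefixOf ([] : List Char)) = false := rfl
  rw [h0]
  simp only [Bool.false_eq_true, if_false]
  cases hn : l.length with
  | zero =>
      have hl : l = [] := List.length_eq_zero_iff.mp hn
      subst hl
      by_cases h : c = d
      · simp [h, PySem.Chars.rfind.go, List.isPrefixOf]
      · simp [h, PySem.Chars.rfind.go, List.isPrefixOf, Ne.symm h]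
  | succ n =>
      have hdn : (l ++ [c]).drop (n + 1) = [c] := by
        rw [List.drop_append_of_le_length (by omega), List.drop_eq_nil_of_le (by omega)]
        simp
      have hln : l.drop (n + 1) = [] := List.drop_eq_nil_of_le (by omega)
      have hpn : ([d].isPrefixOf ((l ++ [c]).drop (n + 1))) = (d == c && true) := by
        rw [hdn]; rfl
      have hln' : ([d].isPrefixOf (l.drop (n + 1))) = false := by rw [hln]; rfl
      simp only [PySem.Chars.rfind.go, hpn, hln', Bool.and_true, Bool.false_eq_true, if_false]
      by_cases h : c = d
      · simp [h]
      · rw [if_neg h]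
        have hne : (d == c) = false := by simp [Ne.symm h]
        rw [hne]
        simp only [Bool.false_eq_true, if_false]
        exact pv_go_append_lt l c d n (by omega)

theorem pv_key (l : List Char) :
    (!(l.foldl (fun right_mouth i =>
        let right_mouth := if i = '<' then true else right_mouth
        let right_mouth := if i = '>' then false else right_mouth
        right_mouth) false)) =
      decide (PySem.Chars.rfind l ['<'] ≤ PySem.Chars.rfind l ['>']) := by
  induction l using List.reverseRecOn with
  | nil => decide
  | append_singleton l c ih =>
      rw [List.foldl_append, List.foldl_cons, List.foldl_nil,
        pv_rfind_append l c '<', pv_rfind_append l c '>']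
      by_cases h1 : c = '<'
      · have h2 : c ≠ '>' := by subst h1; decide
        have := pv_rfind_lt_length l '>'
        simp [h1, not_le.mpr this]
      · by_cases h2 : c = '>'
        · have := pv_rfind_lt_length l '<'
          simp [h2]
          omega
        · simpa [h1, h2] using ih

-- ===== VERDICT (by name: the statement is the Claim_ definition above) =====
theorem htmlPharseTester_spec : Claim_equal_htmlPharseTester := by
  intro str _
  unfold Spec_htmlPharseTester htmlPharseTester htmlPharseTester_alt
  rw [PySem.Str.rfind_eq, PySem.Str.rfind_eq]
  simpa using pv_key str.toList
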